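-- pv_equiv track=rewrite | github.com/coolstar/sandblaster | helpers/extract_sandbox_data.py | extract_sbops
-- ===== SOURCE A (Python) =====
-- def extract_sbops(binary, string_tables):
--     def transform(v):
--         if len(v) <= 3:
--             return None
--         idxs = []
--         for idx,val in enumerate(v):
--             if val == 'default':
--                 idxs.append(idx)
--         return [v[idx:] for idx in idxs]
--
--     def get_sol(posible):
--         assert(len(posible) >= 1)
--         sol = []
--         if len(posible) > 1:
--             cnt = min(len(v) for v in posible)
--             for vals in zip(*[v[:cnt] for v in posible]):
--                 if not all(v == vals[0] for v in vals):
--                     break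
--                 sol.append(vals[0])
--         else:
--             sol.append(posible[0][0])
--             for c in posible[0][1:]:
--                 if c in ['HOME','default']:
--                     break
--                 sol.append(c)
--         return sol
--
--     sbops_v = [transform(v) for v in string_tables]
--     sbops_v = [v for v in sbops_v if v != None and v != []]
--     sbops_v = [x for v in sbops_v for x in v]
--     return get_sol(sbops_v)
-- ===== SOURCE B (Python) =====
-- def extract_sbops(binary, string_tables):
--     # Candidates: for each table longer than 3 entries, every suffix starting at a 'default' token.
--     cands = [v[i:]
--              for v in string_tables if len(v) > 3
--              for i, x in enumerate(v) if x == 'default']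
--     assert len(cands) >= 1
--     if len(cands) == 1:
--         seq = cands[0]
--         sol = [seq[0]]
--         for c in seq[1:]:
--             if c in ('HOME', 'default'):
--                 break
--             sol.append(c)
--         return sol
--
--     def lcp2(a, b):
--         out = []
--         for x, y in zip(a, b):
--             if x != y:
--                 break
--             out.append(x)
--         return out
--
--     acc = cands[0]
--     for v in cands[1:]:
--         acc = lcp2(acc, v)
--     return acc
-- ===== Notes on version B (the rewrite author's own statement) =====
-- stated objective: alternative
-- what changed: The candidate list is built in one flat comprehension (no None/[] filtering pass), and the multi-candidate common prefix is computed by folding a pairwise longest-common-prefix over the candidates instead of A's column-wise zip over all truncated sequences with a precomputed min length.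
import Mathlib
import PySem

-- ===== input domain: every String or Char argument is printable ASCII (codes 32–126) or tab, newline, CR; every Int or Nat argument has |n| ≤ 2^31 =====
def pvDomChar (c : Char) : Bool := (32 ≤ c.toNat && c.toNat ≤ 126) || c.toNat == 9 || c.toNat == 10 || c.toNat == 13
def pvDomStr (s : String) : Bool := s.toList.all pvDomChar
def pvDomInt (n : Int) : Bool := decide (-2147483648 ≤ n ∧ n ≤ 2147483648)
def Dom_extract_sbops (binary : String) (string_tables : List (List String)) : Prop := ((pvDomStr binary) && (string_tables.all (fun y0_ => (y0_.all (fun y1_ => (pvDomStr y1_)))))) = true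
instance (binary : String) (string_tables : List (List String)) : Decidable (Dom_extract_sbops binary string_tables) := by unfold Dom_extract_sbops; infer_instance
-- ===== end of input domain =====

-- B replaces A's three-pass build (map transform / filter None-and-[] / flatten) by one flat
-- comprehension and computes the multi-candidate common prefix by folding a pairwise
-- longest-common-prefix instead of A's column-wise zip with a precomputed min length.

-- ===== PORT A =====

-- 'for c in posible[0][1:]: if c in ['HOME','default']: break; sol.append(c)'
def singleLoopA : List String → List String
  | [] => []
  | c :: rest => if c = "HOME" ∨ c = "default" then [] else c :: singleLoopA rest

def transformA (v : List String) : Option (List (List String)) :=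
  if v.length ≤ 3 then none
  else
    let idxs : List Int := (PySem.List.enumerate v).foldl
      (fun acc p => if p.2 = "default" then acc ++ [p.1] else acc) []
    some (idxs.map (fun idx => PySem.List.slice v (some idx) none))

-- 'for vals in zip(*[v[:cnt] for v in posible])' ported by column index: iteration i reads
-- column i (v.getD i ""); exact because the loop runs for i < cnt = min length ≤ every len v.
def colLoopA (p : List (List String)) (i : Nat) : Nat → List String
  | 0 => []
  | fuel + 1 =>
    let vals := p.map (fun v => v.getD i "")
    let h := vals.headD ""
    if vals.all (fun x => x == h) then h :: colLoopA p (i + 1) fuel else []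

def getSolA (posible : List (List String)) : List String :=
  -- 'assert len(posible) >= 1' raises AssertionError on []: excluded by Pre_; the port returns [].
  if 1 < posible.length then
    let cnt := match posible.map (·.length) with
      | [] => 0
      | x :: xs => xs.foldl Nat.min x
    colLoopA posible 0 cnt
  else
    match posible with
    | [] => []
    | seq :: _ => seq.headD "" :: singleLoopA seq.tail  -- posible[0][0]: seq ≠ [] on every input reaching here inside Pre_

def extract_sbops (binary : String) (string_tables : List (List String)) : List String :=
  let sbops_v1 := string_tables.map transformA
  let sbops_v2 := sbops_v1.filter (fun o => o != none && o != some [])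
  let flat := sbops_v2.flatMap (fun o => o.getD [])
  getSolA flat

-- ===== PORT B =====

def lcp2 : List String → List String → List String
  | x :: xs, y :: ys => if x = y then x :: lcp2 xs ys else []
  | _, _ => []

def singleLoopB : List String → List String
  | [] => []
  | c :: rest => if c = "HOME" ∨ c = "default" then [] else c :: singleLoopB rest

def extract_sbops_alt (binary : String) (string_tables : List (List String)) : List String :=
  let cands := string_tables.flatMap (fun v =>
    if 3 < v.length then
      (PySem.List.enumerate v).filterMap (fun p =>
        if p.2 = "default" then some (PySem.List.slice v (some p.1) none) else none)
    else [])
  match cands with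
  | [] => []  -- 'assert len(cands) >= 1' raises here: excluded by Pre_
  | [seq] => seq.headD "" :: singleLoopB seq.tail
  | a :: l => List.foldl lcp2 a l

-- ===== PRECONDITION & SPEC =====
-- Pre_ excludes exactly the inputs with no candidate suffix (no table longer than 3 entries
-- containing 'default'), on which A's assert raises AssertionError.
def Pre_extract_sbops (binary : String) (string_tables : List (List String)) : Prop :=
  ∃ v ∈ string_tables, 3 < v.length ∧ "default" ∈ v
instance (binary : String) (string_tables : List (List String)) : Decidable (Pre_extract_sbops binary string_tables) := by unfold Pre_extract_sbops; infer_instance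

def pvWitness_extract_sbops : String × List (List String) :=
  ("", [["a", "b", "default", "x"], ["default", "y", "default", "z", "w"]])

def Spec_extract_sbops (binary : String) (string_tables : List (List String)) (out : List String) : Prop := out = extract_sbops_alt binary string_tables
instance (binary : String) (string_tables : List (List String)) (out : List String) : Decidable (Spec_extract_sbops binary string_tables out) := by unfold Spec_extract_sbops; infer_instance

-- ===== CLAIM (what is proved, stated in full; the proofs are below) =====
def Claim_equal_extract_sbops : Prop := ∀ (binary : String) (string_tables : List (List String)), Dom_extract_sbops binary string_tables → Pre_extract_sbops binary string_tables → Spec_extract_sbops binary string_tables (extract_sbops binary string_tables)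

-- ===== LEMMAS AND PROOFS =====

theorem idxs_map (g : Int → List String) : ∀ (l : List (Int × String)) (acc : List Int),
    (l.foldl (fun acc p => if p.2 = "default" then acc ++ [p.1] else acc) acc).map g
      = acc.map g ++ l.filterMap (fun p => if p.2 = "default" then some (g p.1) else none) := by
  intro l
  induction l with
  | nil => intro acc; simp
  | cons a l ih =>
    intro acc
    by_cases h : a.2 = "default" <;> simp [h, ih]

theorem transformA_getD (v : List String) :
    (transformA v).getD []
      = (if 3 < v.length then
          (PySem.List.enumerate v).filterMap (fun p =>
            if p.2 = "default" then some (PySem.List.slice v (some p.1) none) else none)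
        else []) := by
  unfold transformA
  by_cases h : v.length ≤ 3
  · simp [h, Nat.not_lt.mpr h]
  · simp only [if_neg h, if_pos (Nat.lt_of_not_le h), Option.getD_some]
    rw [idxs_map]
    simp

theorem filter_flatMap_getD (l : List (Option (List (List String)))) :
    (l.filter (fun o => o != none && o != some [])).flatMap (fun o => o.getD [])
      = l.flatMap (fun o => o.getD []) := by
  induction l with
  | nil => rfl
  | cons o l ih =>
    rcases o with _ | ⟨_ | ⟨x, xs⟩⟩ <;> simp [List.filter_cons, ih]

theorem cands_eq (string_tables : List (List String)) :
    ((string_tables.map transformA).filter (fun o => o != none && o != some [])).flatMap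
        (fun o => o.getD [])
      = string_tables.flatMap (fun v =>
          if 3 < v.length then
            (PySem.List.enumerate v).filterMap (fun p =>
              if p.2 = "default" then some (PySem.List.slice v (some p.1) none) else none)
          else []) := by
  rw [filter_flatMap_getD, List.flatMap_map]
  exact List.flatMap_congr (fun v _ => transformA_getD v)

-- min-fold facts
theorem foldl_min_le_init : ∀ (xs : List Nat) (x : Nat), xs.foldl Nat.min x ≤ x := by
  intro xs
  induction xs with
  | nil => intro x; exact le_refl x
  | cons y ys ih => intro x; exact le_trans (ih (Nat.min x y)) (Nat.min_le_left x y)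

theorem foldl_min_le_mem : ∀ (xs : List Nat) (x y : Nat), y ∈ xs → xs.foldl Nat.min x ≤ y := by
  intro xs
  induction xs with
  | nil => intro x y h; cases h
  | cons z zs ih =>
    intro x y h
    rcases List.mem_cons.mp h with rfl | h
    · exact le_trans (foldl_min_le_init zs (Nat.min x y)) (Nat.min_le_right x y)
    · exact ih (Nat.min x z) y h

theorem foldl_min_eq_or_mem : ∀ (xs : List Nat) (x : Nat),
    xs.foldl Nat.min x = x ∨ xs.foldl Nat.min x ∈ xs := by
  intro xs
  induction xs with
  | nil => intro x; exact Or.inl rfl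
  | cons y ys ih =>
    intro x
    rcases ih (Nat.min x y) with h | h
    · rw [List.foldl_cons, h]
      rcases Nat.le_total x y with hxy | hxy
      · refine Or.inl ?_
        have hm : Nat.min x y = x := Nat.min_eq_left hxy
        rw [hm]
      · refine Or.inr ?_
        have hm : Nat.min x y = y := Nat.min_eq_right hxy
        rw [hm]
        exact List.mem_cons_self
    · exact Or.inr (List.mem_cons_of_mem y h)

-- lcp2 facts
theorem lcp2_nil_left (v : List String) : lcp2 [] v = [] := by cases v <;> rfl
theorem lcp2_nil_right (v : List String) : lcp2 v [] = [] := by cases v <;> rfl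

theorem lcp2_prefix : ∀ (a b : List String), lcp2 a b <+: a := by
  intro a
  induction a with
  | nil => intro b; rw [lcp2_nil_left]
  | cons x xs ih =>
    intro b
    cases b with
    | nil => rw [lcp2_nil_right]; exact List.nil_prefix
    | cons y ys =>
      show (if x = y then x :: lcp2 xs ys else []) <+: x :: xs
      split
      · exact List.cons_prefix_cons.mpr ⟨rfl, ih ys⟩
      · exact List.nil_prefix

theorem lcp2_nil_mono : ∀ {y x w : List String}, y <+: x → lcp2 x w = [] → lcp2 y w = [] := by
  intro y x w hp h
  cases y with
  | nil => exact lcp2_nil_left w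
  | cons c y' =>
    obtain ⟨t, ht⟩ := hp
    cases w with
    | nil => exact lcp2_nil_right _
    | cons d w' =>
      subst ht
      by_cases hcd : c = d
      · exfalso
        have h' : (if c = d then c :: lcp2 (y' ++ t) w' else []) = [] := by
          rw [show (if c = d then c :: lcp2 (y' ++ t) w' else [])
              = lcp2 ((c :: y') ++ t) (d :: w') from rfl]
          exact h
        rw [if_pos hcd] at h'
        exact List.cons_ne_nil _ _ h'
      · show (if c = d then c :: lcp2 y' w' else []) = []
        rw [if_neg hcd]

theorem foldl_lcp2_nil_left : ∀ (l : List (List String)), List.foldl lcp2 [] l = [] := by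
  intro l
  induction l with
  | nil => rfl
  | cons a l ih => rw [List.foldl_cons, lcp2_nil_left]; exact ih

theorem foldl_lcp2_eq_nil : ∀ (l : List (List String)) (x v : List String),
    v ∈ l → lcp2 x v = [] → List.foldl lcp2 x l = [] := by
  intro l
  induction l with
  | nil => intro x v h; cases h
  | cons a l ih =>
    intro x v hmem h
    rw [List.foldl_cons]
    rcases List.mem_cons.mp hmem with rfl | hmem
    · rw [h]; exact foldl_lcp2_nil_left l
    · exact ih _ v hmem (lcp2_nil_mono (lcp2_prefix x a) h)

theorem foldl_lcp2_cons : ∀ (l : List (List String)) (x : List String) (h : String),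
    (∀ v ∈ l, ∃ t, v = h :: t) →
    List.foldl lcp2 (h :: x) l = h :: List.foldl lcp2 x (l.map List.tail) := by
  intro l
  induction l with
  | nil => intro x h _; rfl
  | cons a l ih =>
    intro x h hall
    obtain ⟨t, rfl⟩ := hall a List.mem_cons_self
    have hstep : lcp2 (h :: x) (h :: t) = h :: lcp2 x t := by
      show (if h = h then _ else []) = _
      rw [if_pos rfl]
    rw [List.map_cons, List.foldl_cons, List.foldl_cons, hstep, List.tail_cons]
    exact ih (lcp2 x t) h (fun v hv => hall v (List.mem_cons_of_mem _ hv))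

theorem colLoop_eq : ∀ (fuel i : Nat) (a : List String) (l : List (List String)),
    (∀ v ∈ a :: l, i + fuel ≤ v.length) →
    (∃ v ∈ a :: l, v.length = i + fuel) →
    colLoopA (a :: l) i fuel = List.foldl lcp2 (a.drop i) (l.map (fun v => v.drop i)) := by
  intro fuel
  induction fuel with
  | zero =>
    intro i a l _ hex
    obtain ⟨v, hv, hlen⟩ := hex
    have hdrop : v.drop i = [] := by
      apply List.drop_eq_nil_of_le
      omega
    rcases List.mem_cons.mp hv with rfl | hv
    · rw [hdrop]; exact (foldl_lcp2_nil_left _).symm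
    · exact (foldl_lcp2_eq_nil _ _ (v.drop i) (List.mem_map_of_mem hv)
        (by rw [hdrop]; exact lcp2_nil_right _)).symm
  | succ fuel ih =>
    intro i a l hle hex
    have hlt : ∀ v ∈ a :: l, i < v.length := by
      intro v hv; have := hle v hv; omega
    have hdropc : ∀ v ∈ a :: l, v.drop i = v.getD i "" :: v.drop (i + 1) := by
      intro v hv
      have h := hlt v hv
      rw [List.getD_eq_getElem v "" h]
      exact List.drop_eq_getElem_cons h
    show (if ((a :: l).map (fun v => v.getD i "")).all
            (fun x => x == ((a :: l).map (fun v => v.getD i "")).headD "") then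
          ((a :: l).map (fun v => v.getD i "")).headD "" :: colLoopA (a :: l) (i + 1) fuel
        else []) = _
    have hhead : ((a :: l).map (fun v => v.getD i "")).headD "" = a.getD i "" := rfl
    rw [hhead]
    by_cases hall : ∀ v ∈ a :: l, v.getD i "" = a.getD i ""
    · rw [if_pos]
      · have ihres := ih (i + 1) a l (by intro v hv; have := hle v hv; omega)
          (by obtain ⟨v, hv, hlen⟩ := hex; exact ⟨v, hv, by omega⟩)
        rw [ihres]
        have hra : a.drop i = a.getD i "" :: a.drop (i + 1) := hdropc a List.mem_cons_self
        have hforall : ∀ w ∈ l.map (fun v => v.drop i), ∃ t, w = a.getD i "" :: t := by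
          intro w hw
          obtain ⟨v, hv, rfl⟩ := List.mem_map.mp hw
          exact ⟨v.drop (i + 1), by
            rw [hdropc v (List.mem_cons_of_mem _ hv), hall v (List.mem_cons_of_mem _ hv)]⟩
        have hmapeq : (l.map (fun v => v.drop i)).map List.tail
            = l.map (fun v => v.drop (i + 1)) := by
          rw [List.map_map]
          exact List.map_congr_left (fun v _ => by simp [Function.comp, List.tail_drop])
        rw [hra, foldl_lcp2_cons (l.map (fun v => v.drop i)) (a.drop (i + 1))
          (a.getD i "") hforall, hmapeq]
      · rw [List.all_eq_true]
        intro x hx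
        obtain ⟨v, hv, rfl⟩ := List.mem_map.mp hx
        exact beq_iff_eq.mpr (hall v hv)
    · rw [if_neg]
      · push_neg at hall
        obtain ⟨v, hv, hne⟩ := hall
        have hvl : v ∈ l := by
          rcases List.mem_cons.mp hv with rfl | h
          · exact absurd rfl hne
          · exact h
        symm
        apply foldl_lcp2_eq_nil _ _ (v.drop i) (List.mem_map_of_mem hvl)
        rw [hdropc v hv, hdropc a List.mem_cons_self]
        show (if a.getD i "" = v.getD i "" then _ else []) = []
        rw [if_neg (fun h => hne h.symm)]
      · rw [List.all_eq_true]
        push_neg at hall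
        obtain ⟨v, hv, hne⟩ := hall
        intro hc
        exact hne (beq_iff_eq.mp (hc _ (List.mem_map_of_mem hv)))

theorem singleLoop_eq : ∀ (l : List String), singleLoopA l = singleLoopB l := by
  intro l
  induction l with
  | nil => rfl
  | cons c rest ih => unfold singleLoopA singleLoopB; rw [ih]

theorem getSolA_two (a b : List String) (l : List (List String)) :
    getSolA (a :: b :: l) = List.foldl lcp2 a (b :: l) := by
  unfold getSolA
  rw [if_pos (by simp)]
  show colLoopA (a :: b :: l) 0
      (((b :: l).map (·.length)).foldl Nat.min a.length) = _
  set cnt := ((b :: l).map (·.length)).foldl Nat.min a.length with hcnt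
  have hle : ∀ v ∈ a :: b :: l, 0 + cnt ≤ v.length := by
    intro v hv
    rw [Nat.zero_add]
    rcases List.mem_cons.mp hv with rfl | hv
    · exact foldl_min_le_init _ _
    · exact foldl_min_le_mem _ _ _ (List.mem_map_of_mem hv)
  have hex : ∃ v ∈ a :: b :: l, v.length = 0 + cnt := by
    rw [Nat.zero_add]
    rcases foldl_min_eq_or_mem ((b :: l).map (·.length)) a.length with h | h
    · exact ⟨a, List.mem_cons_self, h.symm⟩
    · obtain ⟨v, hv, hlen⟩ := List.mem_map.mp h
      exact ⟨v, List.mem_cons_of_mem _ hv, hlen⟩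
  rw [colLoop_eq cnt 0 a (b :: l) hle hex]
  simp

theorem extract_eq (binary : String) (string_tables : List (List String)) :
    extract_sbops binary string_tables = extract_sbops_alt binary string_tables := by
  show getSolA (((string_tables.map transformA).filter
      (fun o => o != none && o != some [])).flatMap (fun o => o.getD []))
    = (match string_tables.flatMap (fun v =>
        if 3 < v.length then
          (PySem.List.enumerate v).filterMap (fun p =>
            if p.2 = "default" then some (PySem.List.slice v (some p.1) none) else none)
        else []) with
      | [] => ([] : List String)
      | [seq] => seq.headD "" :: singleLoopB seq.tail
      | a :: l => List.foldl lcp2 a l)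
  rw [cands_eq]
  generalize (string_tables.flatMap (fun v =>
    if 3 < v.length then
      (PySem.List.enumerate v).filterMap (fun p =>
        if p.2 = "default" then some (PySem.List.slice v (some p.1) none) else none)
    else [])) = cands
  rcases cands with _ | ⟨a, _ | ⟨b, l⟩⟩
  · rfl
  · show getSolA [a] = a.headD "" :: singleLoopB a.tail
    unfold getSolA
    rw [if_neg (by simp)]
    show a.headD "" :: singleLoopA a.tail = a.headD "" :: singleLoopB a.tail
    rw [singleLoop_eq]
  · show getSolA (a :: b :: l) = List.foldl lcp2 a (b :: l)
    exact getSolA_two a b l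

-- ===== VERDICT (by name: the statement is the Claim_ definition above) =====
theorem extract_sbops_spec : Claim_equal_extract_sbops := by
  intro binary string_tables _ _
  exact extract_eq binary string_tables
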